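-- pv_equiv track=rewrite | github.com/andrewhamara/Python-LC | 2264.py | largestGoodInteger
-- ===== SOURCE A (Python) =====
-- def largestGoodInteger(num: str) -> str:
--     best = ''
--
--     length = len(num)
--     i = 0
--
--     for i in range(length - 2):
--         if num[i] == num[i+1] == num[i+2]:
--             cur = num[i]
--             if (best and best[0] < cur) or not best:
--                 best = cur + cur + cur
--     return best
-- ===== SOURCE B (Python) =====
-- def largestGoodInteger(num: str) -> str:
--     for c in sorted(set(num), reverse=True):
--         if c * 3 in num:
--             return c * 3
--     return ''
-- ===== Notes on version B (the rewrite author's own statement) =====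
-- stated objective: idiomatic
-- what changed: Instead of scanning every index and tracking a running best, B enumerates the distinct characters of the input in descending order and returns the first whose tripled string occurs as a substring.
import Mathlib
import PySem

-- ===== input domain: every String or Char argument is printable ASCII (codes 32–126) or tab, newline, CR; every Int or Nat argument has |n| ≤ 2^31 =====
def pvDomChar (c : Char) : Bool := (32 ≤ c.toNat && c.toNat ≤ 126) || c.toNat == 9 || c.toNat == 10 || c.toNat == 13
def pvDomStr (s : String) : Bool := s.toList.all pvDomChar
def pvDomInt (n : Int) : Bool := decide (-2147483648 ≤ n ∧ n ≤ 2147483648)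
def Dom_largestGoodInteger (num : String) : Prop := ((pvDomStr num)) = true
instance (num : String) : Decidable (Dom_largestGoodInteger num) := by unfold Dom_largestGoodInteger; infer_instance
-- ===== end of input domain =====

-- B replaces A's index scan with a running best by a descending scan over the distinct
-- characters, returning the first whose tripled string occurs as a substring (idiomatic).

-- ===== PORT A =====
-- A's loop over i in range(len(num)-2), keeping the best triple seen so far
-- (best is kept as a List Char; the final return converts it to a String).
def largestGoodInteger (num : String) : String :=
  let s := num.toList
  String.mk ((PySem.List.pyRange 0 (PySem.Chars.len s - 2) 1).foldl (fun best i =>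
    if PySem.List.pyGetD s i ' ' = PySem.List.pyGetD s (i+1) ' ' ∧
       PySem.List.pyGetD s (i+1) ' ' = PySem.List.pyGetD s (i+2) ' ' then
      let cur := PySem.List.pyGetD s i ' '
      if (best ≠ [] ∧ PySem.List.pyGetD best 0 ' ' < cur) ∨ best = [] then
        [cur, cur, cur]
      else best
    else best) [])

-- ===== PORT B =====
-- 'for c in sorted(set(num), reverse=True): if c*3 in num: return c*3' then 'return '''
def lgiFind (cs : List Char) (s : List Char) : String :=
  match cs with
  | [] => ""
  | c :: rest => if PySem.Chars.isIn [c, c, c] s then String.mk [c, c, c] else lgiFind rest s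

def largestGoodInteger_alt (num : String) : String :=
  lgiFind (PySem.List.sorted (PySem.Set.ofList num.toList) (fun c => c) true) num.toList

-- ===== PRECONDITION & SPEC =====
def Spec_largestGoodInteger (num : String) (out : String) : Prop := out = largestGoodInteger_alt num
instance (num : String) (out : String) : Decidable (Spec_largestGoodInteger num out) := by unfold Spec_largestGoodInteger; infer_instance

-- ===== CLAIM (what is proved, stated in full; the proofs are below) =====
def Claim_equal_largestGoodInteger : Prop := ∀ (num : String), Dom_largestGoodInteger num → Spec_largestGoodInteger num (largestGoodInteger num)

-- ===== LEMMAS AND PROOFS =====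

-- whether a triple of equal characters starts at index i of s
def lgiTrip (s : List Char) (i : Nat) : Bool :=
  decide (i + 2 < s.length ∧ s.getD i ' ' = s.getD (i+1) ' ' ∧ s.getD (i+1) ' ' = s.getD (i+2) ' ')

-- the triple characters among the first k indices
def lgiCand (s : List Char) (k : Nat) : List Char :=
  ((List.range k).filter (lgiTrip s)).map (fun i => s.getD i ' ')

def lgiRep : Option Char → List Char
  | none => []
  | some m => [m, m, m]

def lgiMaxOf : List Char → Option Char
  | [] => none
  | x :: t => some (t.foldl max x)

theorem lgiMaxOf_append (l : List Char) (a : Char) :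
    lgiMaxOf (l ++ [a]) = some (match lgiMaxOf l with | none => a | some m => max m a) := by
  cases l with
  | nil => simp [lgiMaxOf]
  | cons x t => simp [lgiMaxOf, List.foldl_append]

-- invariant of A's loop: after the first k indices, best is the tripled maximum candidate
theorem lgiLoop_inv (s : List Char) (k : Nat) (hk : k ≤ s.length - 2) :
    (List.range k).foldl (fun best (i : Nat) =>
      if PySem.List.pyGetD s (i : Int) ' ' = PySem.List.pyGetD s ((i : Int)+1) ' ' ∧
         PySem.List.pyGetD s ((i : Int)+1) ' ' = PySem.List.pyGetD s ((i : Int)+2) ' ' then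
        if (best ≠ [] ∧ PySem.List.pyGetD best 0 ' ' < PySem.List.pyGetD s (i : Int) ' ') ∨ best = [] then
          [PySem.List.pyGetD s (i : Int) ' ', PySem.List.pyGetD s (i : Int) ' ', PySem.List.pyGetD s (i : Int) ' ']
        else best
      else best) [] = lgiRep (lgiMaxOf (lgiCand s k)) := by
  induction k with
  | zero => simp [lgiCand, lgiMaxOf, lgiRep]
  | succ k ih =>
      have hk' : k ≤ s.length - 2 := by omega
      have hkl : k + 2 < s.length := by omega
      rw [List.range_succ, List.foldl_append, ih hk']
      have h1 : ((k : Int) + 1) = ((k+1 : Nat) : Int) := by push_cast; ring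
      have h2 : ((k : Int) + 2) = ((k+2 : Nat) : Int) := by push_cast; ring
      have hcand : lgiCand s (k+1) = lgiCand s k ++ (if lgiTrip s k then [s.getD k ' '] else []) := by
        simp only [lgiCand, List.range_succ, List.filter_append, List.map_append, List.filter_cons,
          List.filter_nil]
        split_ifs <;> simp
      by_cases ht : lgiTrip s k
      · have htr := (decide_eq_true_iff).mp ht
        rw [hcand, if_pos ht]
        simp only [List.foldl_cons, List.foldl_nil, PySem.List.pyGetD_natCast, h1, h2]
        rw [if_pos ⟨htr.2.1, htr.2.2⟩]
        rw [lgiMaxOf_append]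
        cases hmo : lgiMaxOf (lgiCand s k) with
        | none =>
            have : lgiCand s k = [] := by
              cases hc : lgiCand s k with
              | nil => rfl
              | cons x t => rw [hc] at hmo; simp [lgiMaxOf] at hmo
            simp [lgiRep]
        | some m =>
            simp only [lgiRep, hmo, List.getD_eq_getElem?_getD]
            by_cases hlt : m < s[k]?.getD ' '
            · rw [if_pos (Or.inl ⟨by simp, by simpa [PySem.List.pyGetD, List.getD_eq_getElem?_getD] using hlt⟩)]
              simp [max_eq_right (le_of_lt hlt)]
            · rw [if_neg]
              · simp [max_eq_left (le_of_not_gt hlt)]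
              · simp only [not_or]
                constructor
                · intro hc
                  exact absurd (by simpa [PySem.List.pyGetD, List.getD_eq_getElem?_getD] using hc.2) hlt
                · simp
      · have htr : ¬ (s.getD k ' ' = s.getD (k+1) ' ' ∧ s.getD (k+1) ' ' = s.getD (k+2) ' ') := by
          intro h; exact ht (decide_eq_true_iff.mpr ⟨hkl, h⟩)
        rw [hcand, if_neg ht]
        simp only [List.foldl_cons, List.foldl_nil, PySem.List.pyGetD_natCast, h1, h2]
        rw [if_neg htr]
        simp

-- A's result is the tripled maximum candidate character
theorem lgiA_eq (num : String) :
    largestGoodInteger num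
      = String.mk (lgiRep (lgiMaxOf (lgiCand num.toList (num.toList.length - 2)))) := by
  simp only [largestGoodInteger]
  rw [PySem.List.pyRange_one]
  rw [List.foldl_map]
  have hlen : ((PySem.Chars.len num.toList - 2) - 0).toNat = num.toList.length - 2 := by
    simp [PySem.Chars.len_eq]; omega
  rw [hlen]
  rw [show (fun (best : List Char) (k : Nat) =>
      if PySem.List.pyGetD num.toList (0 + (k:Int)) ' ' = PySem.List.pyGetD num.toList ((0 + (k:Int))+1) ' ' ∧
         PySem.List.pyGetD num.toList ((0 + (k:Int))+1) ' ' = PySem.List.pyGetD num.toList ((0 + (k:Int))+2) ' ' then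
        if (best ≠ [] ∧ PySem.List.pyGetD best 0 ' ' < PySem.List.pyGetD num.toList (0 + (k:Int)) ' ') ∨ best = [] then
          [PySem.List.pyGetD num.toList (0 + (k:Int)) ' ', PySem.List.pyGetD num.toList (0 + (k:Int)) ' ', PySem.List.pyGetD num.toList (0 + (k:Int)) ' ']
        else best
      else best)
    = (fun (best : List Char) (k : Nat) =>
      if PySem.List.pyGetD num.toList (k : Int) ' ' = PySem.List.pyGetD num.toList ((k : Int)+1) ' ' ∧
         PySem.List.pyGetD num.toList ((k : Int)+1) ' ' = PySem.List.pyGetD num.toList ((k : Int)+2) ' ' then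
        if (best ≠ [] ∧ PySem.List.pyGetD best 0 ' ' < PySem.List.pyGetD num.toList (k : Int) ' ') ∨ best = [] then
          [PySem.List.pyGetD num.toList (k : Int) ' ', PySem.List.pyGetD num.toList (k : Int) ' ', PySem.List.pyGetD num.toList (k : Int) ' ']
        else best
      else best) from by funext best k; norm_num]
  rw [lgiLoop_inv num.toList (num.toList.length - 2) (le_refl _)]

theorem lgiTrip_prefix (s : List Char) (i : Nat) (h : lgiTrip s i = true) :
    [s.getD i ' ', s.getD i ' ', s.getD i ' '] <+: s.drop i := by
  obtain ⟨hl, h1, h2⟩ := decide_eq_true_iff.mp h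
  have e0 : s.drop i = s[i] :: s.drop (i+1) := List.drop_eq_getElem_cons (by omega)
  have e1 : s.drop (i+1) = s[i+1] :: s.drop (i+2) := List.drop_eq_getElem_cons (by omega)
  have e2 : s.drop (i+2) = s[i+2] :: s.drop (i+3) := List.drop_eq_getElem_cons (by omega)
  rw [e0, e1, e2]
  have g0 : s.getD i ' ' = s[i] := List.getD_eq_getElem s ' ' (by omega)
  have g1 : s.getD (i+1) ' ' = s[i+1] := List.getD_eq_getElem s ' ' (by omega)
  have g2 : s.getD (i+2) ' ' = s[i+2] := List.getD_eq_getElem s ' ' (by omega)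
  have k0 : s[i] = s.getD i ' ' := g0.symm
  have k1 : s[i+1] = s.getD i ' ' := by rw [← g1, ← h1]
  have k2 : s[i+2] = s.getD i ' ' := by rw [← g2, ← h2, ← h1]
  exact ⟨s.drop (i+3), by rw [k0, k1, k2]; rfl⟩

-- membership bridge: c is a candidate iff ccc occurs as a substring
theorem lgiCand_mem_iff (s : List Char) (c : Char) :
    c ∈ lgiCand s (s.length - 2) ↔ PySem.Chars.isIn [c, c, c] s = true := by
  constructor
  · intro hc
    obtain ⟨i, hi, rfl⟩ := List.mem_map.mp hc
    have hfi := List.mem_filter.mp hi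
    rw [← PySem.Chars.exists_prefix_drop_iff_isIn]
    exact ⟨i, lgiTrip_prefix s i hfi.2⟩
  · intro hin
    obtain ⟨j, hj⟩ := (PySem.Chars.exists_prefix_drop_iff_isIn _ _).mpr hin
    obtain ⟨t, ht⟩ := hj
    have hlen : j + 3 ≤ s.length := by
      have := congrArg List.length ht
      simp [List.length_drop] at this
      omega
    have hget : ∀ d : Nat, d < 3 → s.getD (j + d) ' ' = c := by
      intro d hd
      have : s[(j + d)]? = some c := by
        have h2 : (s.drop j)[d]? = some c := by
          rw [← ht]
          interval_cases d <;> rfl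
        rw [List.getElem?_drop] at h2
        exact h2
      simp [List.getD_eq_getElem?_getD, this]
    have h0 := hget 0 (by omega)
    have h1 := hget 1 (by omega)
    have h2 := hget 2 (by omega)
    simp only [Nat.add_zero] at h0
    refine List.mem_map.mpr ⟨j, List.mem_filter.mpr ⟨List.mem_range.mpr (by omega), ?_⟩, h0⟩
    exact decide_eq_true_iff.mpr ⟨by omega, by rw [h0, h1], by rw [h1, h2]⟩

-- B's scan of the character list returns the head of the filtered list
theorem lgiFind_eq_filter (cs s : List Char) :
    lgiFind cs s = match cs.filter (fun c => PySem.Chars.isIn [c, c, c] s) with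
                   | [] => "" | c :: _ => String.mk [c, c, c] := by
  induction cs with
  | nil => rfl
  | cons c rest ih =>
      by_cases h : PySem.Chars.isIn [c, c, c] s = true
      · simp [lgiFind, h]
      · simp only [Bool.not_eq_true] at h
        simp [lgiFind, h, ih]

theorem lgi_main (num : String) : largestGoodInteger num = largestGoodInteger_alt num := by
  have hmem_s : ∀ c : Char, PySem.Chars.isIn [c, c, c] num.toList = true → c ∈ num.toList := by
    intro c hc
    exact ((PySem.Chars.isIn_iff_infix _ _).mp hc).subset (by simp)
  set s := num.toList with hs
  set cs := PySem.List.sorted (PySem.Set.ofList s) (fun c => c) true with hcs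
  have hmem_cs : ∀ c : Char, c ∈ s → c ∈ cs := fun c hc =>
    (PySem.List.mem_sorted _ _ _ _).mpr ((PySem.Set.mem_ofList s c).mpr hc)
  rw [lgiA_eq, largestGoodInteger_alt, lgiFind_eq_filter]
  cases hf : cs.filter (fun c => PySem.Chars.isIn [c, c, c] s) with
  | nil =>
      have hnone : ∀ c : Char, PySem.Chars.isIn [c, c, c] s = true → False := by
        intro c hc
        have : c ∈ cs.filter (fun c => PySem.Chars.isIn [c, c, c] s) :=
          List.mem_filter.mpr ⟨hmem_cs c (hmem_s c hc), hc⟩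
        rw [hf] at this; exact absurd this (List.not_mem_nil)
      have hcand : lgiCand s (s.length - 2) = [] := by
        cases hc : lgiCand s (s.length - 2) with
        | nil => rfl
        | cons x t =>
            exact absurd ((lgiCand_mem_iff s x).mp (hc ▸ List.mem_cons_self)) (fun h => hnone x h)
      rw [hcand]; rfl
  | cons h tl =>
      have hh : h ∈ cs ∧ PySem.Chars.isIn [h, h, h] s = true := by
        have : h ∈ cs.filter (fun c => PySem.Chars.isIn [c, c, c] s) := by
          rw [hf]; exact List.mem_cons_self
        simpa using List.mem_filter.mp this
      have hhc : h ∈ lgiCand s (s.length - 2) := (lgiCand_mem_iff s h).mpr hh.2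
      cases hcand : lgiCand s (s.length - 2) with
      | nil => rw [hcand] at hhc; exact absurd hhc (List.not_mem_nil)
      | cons x t =>
          set m := t.foldl max x with hm
          have hmmem : m ∈ lgiCand s (s.length - 2) := by
            rw [hcand]
            rcases PySem.List.foldl_max_mem t x with h1 | h1
            · rw [hm, h1]; exact List.mem_cons_self
            · exact List.mem_cons_of_mem x h1
          have hmP : PySem.Chars.isIn [m, m, m] s = true := (lgiCand_mem_iff s m).mp hmmem
          -- h ≤ m : h is a candidate and m is the maximum candidate
          have hle1 : h ≤ m := by
            rw [hcand] at hhc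
            rcases List.mem_cons.mp hhc with h1 | h1
            · rw [h1]; exact (PySem.List.le_foldl_max t x).1
            · exact (PySem.List.le_foldl_max t x).2 h h1
          -- m ≤ h : h heads the descending filtered list that contains m
          have hle2 : m ≤ h := by
            have hmf : m ∈ cs.filter (fun c => PySem.Chars.isIn [c, c, c] s) :=
              List.mem_filter.mpr ⟨hmem_cs m (hmem_s m hmP), hmP⟩
            rw [hf] at hmf
            rcases List.mem_cons.mp hmf with h1 | h1
            · exact le_of_eq h1
            · have hpw : (cs.filter (fun c => PySem.Chars.isIn [c, c, c] s)).Pairwise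
                  (fun a b => b ≤ a) :=
                List.Pairwise.filter _ (PySem.List.sorted_pairwise_rev _ _)
              rw [hf] at hpw
              exact (List.pairwise_cons.mp hpw).1 m h1
          have : m = h := le_antisymm hle2 hle1
          simp only [lgiMaxOf, lgiRep, ← hm, this]

-- ===== VERDICT (by name: the statement is the Claim_ definition above) =====
theorem largestGoodInteger_spec : Claim_equal_largestGoodInteger := by
  intro num _
  exact lgi_main num
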